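-- pv_equiv track=rewrite | github.com/Vladislav1234512345/TBankContests | contest_19_02_2025/task_D.py | get_destroyed_balls
-- ===== SOURCE A (Python) =====
-- def get_destroyed_balls(array: list[int], length: int) -> None:
--     balls_stack = []
--     destroyed_balls_count = 0
--     for i in range(length):
--
--         balls_stack.append(array[i])
--
--         if len(balls_stack) > 2 and balls_stack[-1] == balls_stack[-2] == balls_stack[-3]:
--             if i == length - 1 or array[i + 1] != balls_stack[-1]:
--                 while True:
--                     if balls_stack:
--                         if array[i] == balls_stack[-1]:
--                             destroyed_balls_count += 1
--                             balls_stack.pop()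
--                             continue
--                     break
--     return destroyed_balls_count
-- ===== SOURCE B (Python) =====
-- def get_destroyed_balls(array: list[int], length: int) -> int:
--     # Run-length encode the first `length` balls, then eliminate runs with a
--     # stack of (value, count) pairs instead of an element-by-element ball stack.
--     runs = []
--     for i in range(length):
--         v = array[i]
--         if runs and runs[-1][0] == v:
--             runs[-1] = (v, runs[-1][1] + 1)
--         else:
--             runs.append((v, 1))
--     destroyed = 0
--     stack = []
--     for v, c in runs:
--         if stack and stack[-1][0] == v:
--             stack[-1] = (v, stack[-1][1] + c)
--         else:
--             stack.append((v, c))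
--         if stack[-1][1] >= 3:
--             destroyed += stack[-1][1]
--             stack.pop()
--     return destroyed
-- ===== Notes on version B (the rewrite author's own statement) =====
-- stated objective: alternative
-- what changed: B run-length-encodes the first `length` balls and eliminates groups on a stack of (value,count) pairs, instead of A's element-by-element ball stack with a triple-equality check and an inner popping while-loop.
-- outside the precondition, e.g. on get_destroyed_balls([1, 2], 5): A raises IndexError, B raises IndexError
import Mathlib
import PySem

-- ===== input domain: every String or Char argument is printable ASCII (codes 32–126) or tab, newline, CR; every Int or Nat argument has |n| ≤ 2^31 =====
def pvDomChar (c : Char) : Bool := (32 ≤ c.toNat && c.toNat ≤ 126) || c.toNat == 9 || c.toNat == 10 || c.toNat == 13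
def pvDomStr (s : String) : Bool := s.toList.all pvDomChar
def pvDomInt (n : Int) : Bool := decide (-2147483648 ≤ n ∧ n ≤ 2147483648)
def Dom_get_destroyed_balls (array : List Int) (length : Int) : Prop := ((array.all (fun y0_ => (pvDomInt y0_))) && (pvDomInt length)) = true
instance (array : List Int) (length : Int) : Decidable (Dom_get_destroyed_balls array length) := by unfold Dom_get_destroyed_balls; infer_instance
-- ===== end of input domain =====

-- B replaces A's element-by-element ball stack by run-length encoding plus a stack of
-- (value, count) pairs — a different data structure for the same task at the same cost.

-- ===== PORT A =====
-- A's Python list `balls_stack` appends/pops at its end; here it is kept head-first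
-- (head = Python's balls_stack[-1]), a faithful representation of the same state.
-- inner `while True: … pop` loop of A:
def pvPopAll (v : Int) : List Int → Int → List Int × Int
  | [], cnt => ([], cnt)
  | h :: t, cnt => if v = h then pvPopAll v t (cnt + 1) else (h :: t, cnt)

-- `for i in range(length)` body; array[i] via pyGet? (none = IndexError, excluded by Pre_,
-- so the `.getD 0` default is never reached on admitted inputs).
def pvALoop (array : List Int) (length : Int) : List Int → List Int → Int → Int
  | [], _, cnt => cnt
  | i :: is, stack, cnt =>
    let v := ((PySem.List.pyGet? array i).getD 0)
    let s := v :: stack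
    match s with
    | a :: b :: c :: _ =>
      if a = b ∧ b = c then
        if i = length - 1 ∨ ((PySem.List.pyGet? array (i + 1)).getD 0) ≠ a then
          let p := pvPopAll v s cnt
          pvALoop array length is p.1 p.2
        else pvALoop array length is s cnt
      else pvALoop array length is s cnt
    | _ => pvALoop array length is s cnt

def get_destroyed_balls (array : List Int) (length : Int) : Int :=
  pvALoop array length (PySem.List.pyRange 0 length 1) [] 0

-- ===== PORT B =====
-- Source B's first loop builds `runs`, growing/updating runs[-1]; here the list is kept
-- last-run-first (head = Python's runs[-1]) and reversed before the second loop.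
def pvRleLoop (array : List Int) : List Int → List (Int × Int) → List (Int × Int)
  | [], runs => runs
  | i :: is, runs =>
    let v := ((PySem.List.pyGet? array i).getD 0)
    match runs with
    | (w, c) :: rest =>
      if w = v then pvRleLoop array is ((v, c + 1) :: rest)
      else pvRleLoop array is ((v, 1) :: (w, c) :: rest)
    | [] => pvRleLoop array is [(v, 1)]

-- Source B's second-loop body (pair stack head = Python's stack[-1])
def pvBStep (st : List (Int × Int) × Int) (run : Int × Int) : List (Int × Int) × Int :=
  let stack :=
    match st.1 with
    | (w, m) :: rest => if w = run.1 then (run.1, m + run.2) :: rest else run :: (w, m) :: rest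
    | [] => [run]
  match stack with
  | (_, m) :: rest => if 3 ≤ m then (rest, st.2 + m) else (stack, st.2)
  | [] => ([], st.2)

def get_destroyed_balls_alt (array : List Int) (length : Int) : Int :=
  ((((pvRleLoop array (PySem.List.pyRange 0 length 1) []).reverse).foldl pvBStep ([], 0))).2

-- ===== PRECONDITION & SPEC =====
-- A indexes array[i] for every i in range(length): it raises IndexError exactly when
-- length > len(array); Pre_ excludes exactly those inputs (negative length returns 0 and stays in).
def Pre_get_destroyed_balls (array : List Int) (length : Int) : Prop :=
  length ≤ (array.length : Int)
instance (array : List Int) (length : Int) : Decidable (Pre_get_destroyed_balls array length) := by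
  unfold Pre_get_destroyed_balls; infer_instance

def pvWitness_get_destroyed_balls : List Int × Int := ([2, 1, 1, 1, 2, 2, 2], 7)

def Spec_get_destroyed_balls (array : List Int) (length : Int) (out : Int) : Prop := out = get_destroyed_balls_alt array length
instance (array : List Int) (length : Int) (out : Int) : Decidable (Spec_get_destroyed_balls array length out) := by unfold Spec_get_destroyed_balls; infer_instance

-- ===== CLAIM (what is proved, stated in full; the proofs are below) =====
def Claim_equal_get_destroyed_balls : Prop := ∀ (array : List Int) (length : Int), Dom_get_destroyed_balls array length → Pre_get_destroyed_balls array length → Spec_get_destroyed_balls array length (get_destroyed_balls array length)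

-- ===== LEMMAS AND PROOFS =====

-- Structural (index-free) version of A's loop over the processed prefix.
def refA : List Int → List Int → Int → Int
  | [], _, cnt => cnt
  | v :: rest, stack, cnt =>
    let s := v :: stack
    match s with
    | a :: b :: c :: _ =>
      if a = b ∧ b = c then
        if rest.head? ≠ some a then
          let p := pvPopAll v s cnt
          refA rest p.1 p.2
        else refA rest s cnt
      else refA rest s cnt
    | _ => refA rest s cnt

-- Structural version of Source B's first loop.
def refRle : List Int → List (Int × Int) → List (Int × Int)
  | [], runs => runs
  | v :: rest, runs =>
    match runs with
    | (w, c) :: rs =>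
      if w = v then refRle rest ((v, c + 1) :: rs)
      else refRle rest ((v, 1) :: (w, c) :: rs)
    | [] => refRle rest [(v, 1)]

def flatF (runs : List (Int × Int)) : List Int := runs.flatMap (fun p => List.replicate p.2.toNat p.1)

def RunsWf (runs : List (Int × Int)) : Prop :=
  (∀ p ∈ runs, 1 ≤ p.2) ∧ runs.IsChain (fun p q => p.1 ≠ q.1)

def StackWf (rs : List (Int × Int)) : Prop :=
  (∀ p ∈ rs, 1 ≤ p.2 ∧ p.2 ≤ 2) ∧ rs.IsChain (fun p q => p.1 ≠ q.1)

lemma popAll_replicate (v : Int) (k : Nat) (s₀ : List Int) (cnt : Int)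
    (h : s₀.head? ≠ some v) :
    pvPopAll v (List.replicate k v ++ s₀) cnt = (s₀, cnt + k) := by
  induction k generalizing cnt with
  | zero =>
    cases s₀ with
    | nil => simp [pvPopAll]
    | cons a t =>
      have hva : v ≠ a := fun hv => h (by simp [hv])
      rw [List.replicate, List.nil_append, pvPopAll, if_neg hva]
      simp
  | succ k ih =>
    simp [List.replicate_succ, pvPopAll, ih]
    ring

lemma refA_cons_of_head (v : Int) (rest stack : List Int) (cnt : Int)
    (h : rest.head? = some v) :
    refA (v :: rest) stack cnt = refA rest (v :: stack) cnt := by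
  cases stack with
  | nil => simp [refA]
  | cons b t =>
    cases t with
    | nil => simp [refA]
    | cons c t' =>
      simp only [refA]
      split
      · rename_i hab
        obtain ⟨h1, h2⟩ := hab
        subst h1
        rw [if_neg]
        simp [h]
      · rfl

lemma flatF_head (rs : List (Int × Int)) (h : ∀ p ∈ rs, 1 ≤ p.2) :
    (flatF rs).head? = rs.head?.map Prod.fst := by
  cases rs with
  | nil => simp [flatF]
  | cons p t =>
    have h1 : 1 ≤ p.2 := h p (by simp)
    obtain ⟨n, hn⟩ : ∃ n, p.2.toNat = n + 1 := ⟨p.2.toNat - 1, by omega⟩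
    simp [flatF, hn, List.replicate_succ]

-- processing one whole run of c copies of v (run boundary right after it)
lemma refA_run (c : Nat) (hc : 1 ≤ c) (v : Int) (rest : List Int) (m : Nat)
    (s₀ : List Int) (cnt : Int) (hr : rest.head? ≠ some v) (hs : s₀.head? ≠ some v) :
    refA (List.replicate c v ++ rest) (List.replicate m v ++ s₀) cnt
      = if 3 ≤ m + c then refA rest s₀ (cnt + (m + c))
        else refA rest (List.replicate (m + c) v ++ s₀) cnt := by
  induction c generalizing m with
  | zero => omega
  | succ c ih =>
    cases c with
    | zero =>
      -- last element of the run
      rw [show List.replicate (0+1) v ++ rest = v :: rest by simp]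
      match m, s₀, hs with
      | 0, [], _ =>
        simp [refA]
      | 0, a :: t, hs =>
        have hva : v ≠ a := fun hv => hs (by simp [hv])
        cases t with
        | nil => simp [refA, hva]
        | cons b t' => simp [refA, hva]
      | 1, s₀, hs =>
        rw [List.replicate]
        cases s₀ with
        | nil => simp [refA]
        | cons a t =>
          have hva : v ≠ a := fun hv => hs (by simp [hv])
          simp [refA, List.replicate_succ]
          exact fun hv _ => absurd hv hva
      | (m+2), s₀, hs =>
        rw [List.replicate_succ, List.replicate_succ]
        have h3 : 3 ≤ (m + 2) + 1 := by omega
        simp only [refA, List.cons_append]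
        rw [if_pos ⟨trivial, trivial⟩, if_pos hr]
        have : pvPopAll v (v :: (v :: v :: (List.replicate m v ++ s₀))) cnt = (s₀, cnt + (m + 3 : Nat)) := by
          have := popAll_replicate v (m + 3) s₀ cnt hs
          simpa [List.replicate_succ] using this
        simp only [this]
        rw [if_pos (by omega)]
        congr 1
    | succ c =>
      -- next element is still v: both branches of A's body keep pushing
      rw [List.replicate_succ, List.cons_append]
      rw [refA_cons_of_head v _ _ cnt (by simp [List.replicate_succ])]
      have := ih (by omega) (m + 1)
      rw [show (v :: (List.replicate m v ++ s₀)) = List.replicate (m+1) v ++ s₀ by simp [List.replicate_succ]]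
      rw [this]
      have e : m + 1 + (c + 1) = m + (c + 1 + 1) := by omega
      rw [e]
      have e2 : (cnt + ((m:Int) + 1 + ((c:Int) + 1)) : Int) = cnt + ((m:Int) + ((c:Int) + 1 + 1)) := by ring
      simp only [Nat.cast_add, Nat.cast_one] at *
      rw [e2]

lemma bridgeA (array : List Int) (n : Nat) (hn : n ≤ array.length) :
    ∀ k : Nat, k ≤ n → ∀ stack cnt,
      pvALoop array (n : Int) (PySem.List.pyRange k n 1) stack cnt
        = refA ((array.take n).drop k) stack cnt := by
  intro k hk
  induction hd : n - k generalizing k with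
  | zero =>
    intro stack cnt
    have hkn : k = n := by omega
    subst hkn
    rw [show PySem.List.pyRange (k:Int) (k:Int) 1 = [] by simp [pysem]]
    rw [List.drop_of_length_le (by simp)]
    simp [pvALoop, refA]
  | succ d ih =>
    intro stack cnt
    have hklt : k < n := by omega
    rw [PySem.List.pyRange_one_cons (by exact_mod_cast hklt)]
    have hkarr : k < array.length := by omega
    have hget : ((PySem.List.pyGet? array (k : Int)).getD 0) = array[k] := by
      simp [PySem.List.pyGet?_natCast, List.getElem?_eq_getElem hkarr]
    have hdrop : (array.take n).drop k = array[k] :: (array.take n).drop (k + 1) := by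
      rw [List.drop_eq_getElem_cons (by simp; omega)]
      simp [List.getElem_take]
    have hrange : ((k : Int) + 1) = ((k + 1 : Nat) : Int) := by push_cast; ring
    have ihk := ih (k + 1) (by omega) (by omega)
    -- A's boundary test `i == length-1 or array[i+1] != top` matches head? of the rest of the prefix
    have hbound : ∀ a : Int, ((k:Int) = (n:Int) - 1 ∨ ((PySem.List.pyGet? array ((k:Int) + 1)).getD 0) ≠ a)
        ↔ (((array.take n).drop (k + 1)).head? ≠ some a) := by
      intro a
      by_cases hlast : k + 1 = n
      · constructor
        · intro _
          rw [List.drop_of_length_le (by simp; omega)]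
          simp
        · intro _; left; omega
      · have hk1 : k + 1 < n := by omega
        have hk1arr : k + 1 < array.length := by omega
        have : (array.take n).drop (k+1) = array[k+1] :: (array.take n).drop (k + 2) := by
          rw [List.drop_eq_getElem_cons (by simp; omega)]
          simp [List.getElem_take]
        rw [this]
        have hget1 : ((PySem.List.pyGet? array ((k:Int) + 1)).getD 0) = array[k+1] := by
          rw [hrange, PySem.List.pyGet?_natCast, List.getElem?_eq_getElem hk1arr]
          rfl
        rw [hget1]
        constructor
        · rintro (h | h)
          · exfalso; omega
          · simp [h]
        · intro h; right; simpa using h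
    rw [hdrop]
    cases stack with
    | nil =>
      simp only [pvALoop, refA, hget]
      simp only [hrange, ihk]
    | cons b t =>
      cases t with
      | nil =>
        simp only [pvALoop, refA, hget]
        simp only [hrange, ihk]
      | cons c t' =>
        simp only [pvALoop, refA, hget]
        by_cases h3 : array[k] = b ∧ b = c
        · rw [if_pos h3, if_pos h3]
          by_cases hb : ((array.take n).drop (k + 1)).head? ≠ some array[k]
          · rw [if_pos ((hbound array[k]).mpr hb), if_pos hb]
            simp only [hrange, ihk]
          · rw [if_neg (fun hc => hb ((hbound array[k]).mp hc)), if_neg hb]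
            simp only [hrange, ihk]
        · rw [if_neg h3, if_neg h3]
          simp only [hrange, ihk]

lemma bridgeB (array : List Int) (n : Nat) (hn : n ≤ array.length) :
    ∀ k : Nat, k ≤ n → ∀ runs,
      pvRleLoop array (PySem.List.pyRange k n 1) runs
        = refRle ((array.take n).drop k) runs := by
  intro k hk
  induction hd : n - k generalizing k with
  | zero =>
    intro runs
    have hkn : k = n := by omega
    subst hkn
    rw [show PySem.List.pyRange (k:Int) (k:Int) 1 = [] by simp [pysem]]
    rw [List.drop_of_length_le (by simp)]
    simp [pvRleLoop, refRle]
  | succ d ih =>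
    intro runs
    have hklt : k < n := by omega
    rw [PySem.List.pyRange_one_cons (by exact_mod_cast hklt)]
    have hkarr : k < array.length := by omega
    have hget : ((PySem.List.pyGet? array (k : Int)).getD 0) = array[k] := by
      simp [PySem.List.pyGet?_natCast, List.getElem?_eq_getElem hkarr]
    have hdrop : (array.take n).drop k = array[k] :: (array.take n).drop (k + 1) := by
      rw [List.drop_eq_getElem_cons (by simp; omega)]
      simp [List.getElem_take]
    have hrange : ((k : Int) + 1) = ((k + 1 : Nat) : Int) := by push_cast; ring
    have ihk := ih (k + 1) (by omega) (by omega)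
    rw [hdrop]
    cases runs with
    | nil =>
      simp only [pvRleLoop, refRle, hget, hrange, ihk]
    | cons p rs =>
      obtain ⟨w, c⟩ := p
      simp only [pvRleLoop, refRle, hget, hrange, ihk]

-- Source B's first loop produces well-formed runs that flatten back to the input prefix
lemma refRle_ok : ∀ (L : List Int) (acc : List (Int × Int)),
    (∀ p ∈ acc, 1 ≤ p.2) → acc.IsChain (fun p q => p.1 ≠ q.1) →
    (∀ p ∈ refRle L acc, 1 ≤ p.2) ∧ (refRle L acc).IsChain (fun p q => p.1 ≠ q.1) ∧
      flatF ((refRle L acc).reverse) = flatF acc.reverse ++ L := by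
  intro L
  induction L with
  | nil => intro acc h1 h2; exact ⟨h1, h2, by simp [refRle]⟩
  | cons v rest ih =>
    intro acc h1 h2
    match acc, h1, h2 with
    | [], _, _ =>
      have := ih [(v, 1)] (by simp) (by simp)
      simp only [refRle]
      refine ⟨this.1, this.2.1, ?_⟩
      rw [this.2.2]
      simp [flatF]
    | (w, c) :: rs, h1, h2 =>
      by_cases hwv : w = v
      · subst hwv
        simp only [refRle, if_pos rfl, if_true]
        have hc1 : 1 ≤ c := h1 (w, c) (by simp)
        have := ih ((w, c + 1) :: rs)
          (by intro p hp; rcases List.mem_cons.mp hp with h | h; · subst h; simpa using by omega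
              · exact h1 p (List.mem_cons_of_mem _ h))
          (by
            cases rs with
            | nil => simp
            | cons q t =>
              have := h2
              simp only [List.isChain_cons] at this ⊢
              exact this)
        refine ⟨this.1, this.2.1, ?_⟩
        rw [this.2.2]
        have : ((c : Int) + 1).toNat = c.toNat + 1 := by omega
        simp only [flatF, this, List.reverse_cons, List.flatMap_append, List.flatMap_cons,
          List.flatMap_nil, List.append_nil, List.replicate_succ, List.append_assoc, List.cons_append,
          List.nil_append]
        have key : w :: (List.replicate c.toNat w ++ rest) = List.replicate c.toNat w ++ w :: rest := by
          rw [← List.cons_append, ← List.replicate_succ, List.replicate_succ', List.append_assoc,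
            List.singleton_append]
        rw [key]
      · simp only [refRle, if_neg hwv]
        have := ih ((v, 1) :: (w, c) :: rs)
          (by intro p hp; rcases List.mem_cons.mp hp with h | h; · subst h; simp
              · exact h1 p h)
          (by refine List.IsChain.cons h2 ?_
              intro y hy
              simp only [List.head?_cons, Option.mem_def, Option.some.injEq] at hy
              subst hy
              exact fun hv => hwv hv.symm)
        refine ⟨this.1, this.2.1, ?_⟩
        rw [this.2.2]
        simp [flatF]

-- the heart: A's ball stack simulates B's (value, count) stack, run by run
lemma mainSim : ∀ runs rs (cnt : Int), RunsWf runs → StackWf rs →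
    refA (flatF runs) (flatF rs) cnt = (runs.foldl pvBStep (rs, cnt)).2 := by
  intro runs
  induction runs with
  | nil => intro rs cnt _ _; simp [flatF, refA]
  | cons p rest ih =>
    obtain ⟨v, c⟩ := p
    intro rs cnt hruns hwf
    have hc1 : 1 ≤ c := hruns.1 (v, c) (by simp)
    have hrestwf : RunsWf rest :=
      ⟨fun q hq => hruns.1 q (List.mem_cons_of_mem _ hq), (List.isChain_cons.mp hruns.2).2⟩
    have hrhead : (flatF rest).head? ≠ some v := by
      rw [flatF_head rest hrestwf.1]
      cases rest with
      | nil => simp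
      | cons q t =>
        have := (List.isChain_cons.mp hruns.2).1 q (by simp)
        simp only [List.head?_cons, Option.map_some]
        exact fun hh => this (Option.some.inj hh).symm
    have hflat : flatF ((v, c) :: rest) = List.replicate c.toNat v ++ flatF rest := by
      simp [flatF]
    rw [hflat]
    cases rs with
    | nil =>
      have := refA_run c.toNat (by omega) v (flatF rest) 0 [] cnt hrhead (by simp)
      simp only [List.replicate_zero, List.nil_append, Nat.zero_add, flatF, List.flatMap_nil] at this ⊢
      rw [this]
      by_cases h3 : 3 ≤ c
      · rw [if_pos (by omega)]
        have hstep : pvBStep ([], cnt) (v, c) = ([], cnt + c) := by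
          simp [pvBStep, if_pos h3]
        rw [List.foldl_cons, hstep]
        have := ih [] (cnt + c) hrestwf ⟨by simp, by simp⟩
        simp only [flatF, List.flatMap_nil] at this
        rw [← this]
        congr 1
        omega
      · rw [if_neg (by omega)]
        have hstep : pvBStep ([], cnt) (v, c) = ([(v, c)], cnt) := by
          simp [pvBStep, if_neg h3]
        rw [List.foldl_cons, hstep]
        have := ih [(v, c)] cnt hrestwf ⟨by simp; omega, by simp⟩
        rw [← this]
        simp [flatF]
    | cons q rs' =>
      obtain ⟨w, m⟩ := q
      have hm1 : 1 ≤ m := (hwf.1 (w, m) (by simp)).1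
      have hm2 : m ≤ 2 := (hwf.1 (w, m) (by simp)).2
      have hrs'wf : StackWf rs' :=
        ⟨fun q hq => hwf.1 q (List.mem_cons_of_mem _ hq), (List.isChain_cons.mp hwf.2).2⟩
      have hs0head : ∀ u : Int, (rs'.head?.map Prod.fst ≠ some u) → (flatF rs').head? ≠ some u := by
        intro u hu
        rw [flatF_head rs' (fun q hq => (hrs'wf.1 q hq).1)]
        exact hu
      by_cases hwv : w = v
      · subst hwv
        have hflat2 : flatF ((w, m) :: rs') = List.replicate m.toNat w ++ flatF rs' := by
          simp [flatF]
        have hs' : (flatF rs').head? ≠ some w := by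
          apply hs0head
          cases rs' with
          | nil => simp
          | cons q t =>
            have := (List.isChain_cons.mp hwf.2).1 q (by simp)
            simpa using fun hh => this (by simp [hh])
        rw [hflat2, refA_run c.toNat (by omega) w (flatF rest) m.toNat (flatF rs') cnt hrhead hs']
        by_cases h3 : 3 ≤ m + c
        · rw [if_pos (by omega)]
          have hstep : pvBStep ((w, m) :: rs', cnt) (w, c) = (rs', cnt + (m + c)) := by
            simp [pvBStep, if_pos h3]
          rw [List.foldl_cons, hstep, ← ih rs' (cnt + (m + c)) hrestwf hrs'wf]
          congr 1
          omega
        · rw [if_neg (by omega)]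
          have hstep : pvBStep ((w, m) :: rs', cnt) (w, c) = ((w, m + c) :: rs', cnt) := by
            simp [pvBStep, if_neg h3]
          rw [List.foldl_cons, hstep]
          have hwf' : StackWf ((w, m + c) :: rs') := by
            refine ⟨?_, ?_⟩
            · intro q hq
              rcases List.mem_cons.mp hq with h | h
              · subst h; constructor <;> simp <;> omega
              · exact hwf.1 q (List.mem_cons_of_mem _ h)
            · exact List.IsChain.cons hrs'wf.2 (by
                intro y hy
                exact (List.isChain_cons.mp hwf.2).1 y hy)
          rw [← ih ((w, m + c) :: rs') cnt hrestwf hwf']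
          congr 1
          simp only [flatF, List.flatMap_cons]
          congr 2
          omega
      · have hshead : (flatF ((w, m) :: rs')).head? ≠ some v := by
          rw [flatF_head _ (fun q hq => (hwf.1 q hq).1)]
          simpa using fun hh => hwv (by simp [hh])
        have := refA_run c.toNat (by omega) v (flatF rest) 0 (flatF ((w, m) :: rs')) cnt hrhead hshead
        simp only [List.replicate_zero, List.nil_append, Nat.zero_add] at this
        rw [this]
        by_cases h3 : 3 ≤ c
        · rw [if_pos (by omega)]
          have hstep : pvBStep ((w, m) :: rs', cnt) (v, c) = ((w, m) :: rs', cnt + c) := by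
            simp [pvBStep, if_neg hwv, if_pos h3]
          rw [List.foldl_cons, hstep, ← ih ((w, m) :: rs') (cnt + c) hrestwf hwf]
          congr 1
          omega
        · rw [if_neg (by omega)]
          have hstep : pvBStep ((w, m) :: rs', cnt) (v, c) = ((v, c) :: (w, m) :: rs', cnt) := by
            simp [pvBStep, if_neg hwv, if_neg h3]
          rw [List.foldl_cons, hstep]
          have hwf' : StackWf ((v, c) :: (w, m) :: rs') := by
            refine ⟨?_, List.IsChain.cons hwf.2 ?_⟩
            · intro q hq
              rcases List.mem_cons.mp hq with h | h
              · subst h; exact ⟨by simpa using hc1, by simpa using by omega⟩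
              · exact hwf.1 q h
            · intro y hy
              simp only [List.head?_cons, Option.mem_def, Option.some.injEq] at hy
              subst hy
              exact fun hh => hwv hh.symm
          rw [← ih ((v, c) :: (w, m) :: rs') cnt hrestwf hwf']
          simp [flatF]

-- ===== VERDICT (by name: the statement is the Claim_ definition above) =====
theorem get_destroyed_balls_spec : Claim_equal_get_destroyed_balls := by
  intro array length _ hpre
  show get_destroyed_balls array length = get_destroyed_balls_alt array length
  unfold get_destroyed_balls get_destroyed_balls_alt
  by_cases hneg : length ≤ 0
  · rw [show PySem.List.pyRange 0 length 1 = [] by simp [PySem.List.pyRange]; omega]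
    simp [pvALoop, pvRleLoop]
  · have h0 : 0 ≤ length := by omega
    obtain ⟨n, hn⟩ : ∃ n : Nat, length = (n : Int) := ⟨length.toNat, by omega⟩
    have hnlen : n ≤ array.length := by
      have := hpre
      unfold Pre_get_destroyed_balls at this
      omega
    subst hn
    rw [show ((0 : Int)) = ((0 : Nat) : Int) by simp] at *
    rw [bridgeA array n hnlen 0 (by omega), bridgeB array n hnlen 0 (by omega)]
    simp only [List.drop_zero]
    have hok := refRle_ok (array.take n) [] (by simp) (by simp)
    have hrwf : RunsWf ((refRle (array.take n) []).reverse) := by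
      constructor
      · intro p hp
        exact hok.1 p (List.mem_reverse.mp hp)
      · rw [List.isChain_reverse]
        exact hok.2.1.imp (fun _ _ h' => Ne.symm h')
    have := mainSim ((refRle (array.take n) []).reverse) [] 0 hrwf ⟨by simp, by simp⟩
    rw [show flatF ([] : List (Int × Int)) = [] by simp [flatF]] at this
    rw [hok.2.2] at this
    simp only [flatF, List.flatMap_nil, List.nil_append] at this
    exact this
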